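-- pv_equiv track=rewrite | github.com/AmamiRena/py | algorithm/Strings.py | Compare_str
-- ===== SOURCE A (Python) =====
-- import collections
-- import collections
-- import collections
--
-- def Compare_str(str_1,str_2):
--     string_count=collections.defaultdict(int)
--     for s_1 in str_1:
--         string_count[s_1]+=1
--     for s_2 in str_2:
--         if s_2 not in string_count:
--             return False
--         elif string_count[s_2]<=0:
--             return False
--         else:
--             string_count[s_2]-=1
--     return True
-- ===== SOURCE B (Python) =====
-- def Compare_str(str_1, str_2):
--     # Sort both strings and merge-scan: every char of sorted(str_2) must be
--     # matched, in order, by an unused char of sorted(str_1).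
--     a = sorted(str_1)
--     b = sorted(str_2)
--     i = 0
--     for c in b:
--         while i < len(a) and a[i] < c:
--             i += 1
--         if i == len(a) or a[i] != c:
--             return False
--         i += 1
--     return True
-- ===== Notes on version B (the rewrite author's own statement) =====
-- stated objective: alternative
-- what changed: Replaced A's hash-counting decrement loop by sorting both strings and doing a single two-pointer merge scan over the sorted lists; multiset containment holds iff each char of sorted(str_2) is matched in order in sorted(str_1).
import Mathlib
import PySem

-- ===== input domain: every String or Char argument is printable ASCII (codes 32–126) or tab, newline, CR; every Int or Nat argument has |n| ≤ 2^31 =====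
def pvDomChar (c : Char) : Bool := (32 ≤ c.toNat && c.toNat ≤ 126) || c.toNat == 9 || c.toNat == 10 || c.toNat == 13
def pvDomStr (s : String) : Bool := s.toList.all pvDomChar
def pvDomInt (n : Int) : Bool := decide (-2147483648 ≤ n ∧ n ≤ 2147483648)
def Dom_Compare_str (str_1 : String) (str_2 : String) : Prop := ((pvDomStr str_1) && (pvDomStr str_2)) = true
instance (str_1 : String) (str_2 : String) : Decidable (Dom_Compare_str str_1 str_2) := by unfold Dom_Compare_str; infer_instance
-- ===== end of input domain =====

-- B replaces A's hash-counting decrement loop by sorting both strings and doing a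
-- single two-pointer merge scan over the sorted lists (alternative algorithm, similar cost).

-- ===== PORT A =====
-- the 'for s_2 in str_2' loop with its early returns
def CompareStrLoop (d : PySem.Dict Char Int) : List Char → Bool
  | [] => true
  | c :: cs =>
    if d.contains c = false then false
    else if d.getD c 0 ≤ 0 then false
    else CompareStrLoop (d.modify c 0 (· - 1)) cs

def Compare_str (str_1 : String) (str_2 : String) : Bool :=
  -- defaultdict(int) increment loop over str_1
  let string_count := str_1.toList.foldl (fun d c => d.modify c 0 (· + 1)) PySem.Dict.empty
  CompareStrLoop string_count str_2.toList

-- ===== PORT B =====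
-- Source B's 'for c in b' loop with the inner 'while a[i] < c' skip, as a merge
-- recursion over the two sorted lists: skip a-chars below c, demand a match, advance.
def CompareMerge : List Char → List Char → Bool
  | _, [] => true
  | [], _ :: _ => false
  | x :: xs, y :: ys =>
    if x < y then CompareMerge xs (y :: ys)   -- while a[i] < c: i += 1
    else if x = y then CompareMerge xs ys     -- matched; i += 1, next c
    else false                                 -- a[i] != c

def Compare_str_alt (str_1 : String) (str_2 : String) : Bool :=
  let a := PySem.List.sorted str_1.toList (fun c => c) false
  let b := PySem.List.sorted str_2.toList (fun c => c) false
  CompareMerge a b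

-- ===== PRECONDITION & SPEC =====
def Spec_Compare_str (str_1 : String) (str_2 : String) (out : Bool) : Prop := out = Compare_str_alt str_1 str_2
instance (str_1 : String) (str_2 : String) (out : Bool) : Decidable (Spec_Compare_str str_1 str_2 out) := by unfold Spec_Compare_str; infer_instance

-- ===== CLAIM (what is proved, stated in full; the proofs are below) =====
def Claim_equal_Compare_str : Prop := ∀ (str_1 : String) (str_2 : String), Dom_Compare_str str_1 str_2 → Spec_Compare_str str_1 str_2 (Compare_str str_1 str_2)

-- ===== LEMMAS AND PROOFS =====

-- A's str_2-loop succeeds iff every remaining character's demand is covered by the dict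
lemma compareStrLoop_eq (cs : List Char) (d : PySem.Dict Char Int) :
    CompareStrLoop d cs
      = decide (∀ c ∈ cs, (cs.count c : Int) ≤ (if d.contains c then d.getD c 0 else 0)) := by
  induction cs generalizing d with
  | nil => simp [CompareStrLoop]
  | cons c cs ih =>
    by_cases hc : d.contains c
    · by_cases hle : d.getD c 0 ≤ 0
      · have hfail : ¬ ∀ x ∈ c :: cs, (((c :: cs).count x : Int)) ≤ if d.contains x then d.getD x 0 else 0 := by
          intro h
          have hx := h c (by simp)
          rw [if_pos hc] at hx
          have hpos : 0 < (c :: cs).count c := List.count_pos_iff.mpr (by simp)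
          omega
        have hstep : CompareStrLoop d (c :: cs) = false := by
          unfold CompareStrLoop
          rw [if_neg (by simp [hc]), if_pos hle]
        rw [hstep, decide_eq_false hfail]
      · have hstep : CompareStrLoop d (c :: cs) = CompareStrLoop (d.modify c 0 (· - 1)) cs := by
          conv_lhs => rw [CompareStrLoop]
          rw [if_neg (by simp [hc]), if_neg hle]
        rw [hstep, ih]
        congr 1
        apply propext
        have hg : ∀ x : Char,
            (if (d.modify c 0 (· - 1)).contains x then (d.modify c 0 (· - 1)).getD x 0 else 0)
              = (if d.contains x then d.getD x 0 else 0) - (if x = c then 1 else 0) := by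
          intro x
          rw [PySem.Dict.contains_modify, PySem.Dict.getD_modify]
          by_cases hxc : x = c
          · subst hxc; simp [hc]
          · have hne : (x == c) = false := by simp [hxc]
            rw [hne]
            simp only [Bool.false_or, sub_zero, if_neg hxc]
        have hcnt : ∀ x : Char, (((c :: cs).count x : Int)) = (cs.count x : Int) + (if x = c then 1 else 0) := by
          intro x
          by_cases hxc : x = c
          · simp [hxc]
          · simp [hxc, Ne.symm hxc]
        constructor
        · intro h x hx
          rw [hcnt x]
          by_cases hxin : x ∈ cs
          · have h2 := h x hxin
            rw [hg x] at h2
            omega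
          · have h0 : cs.count x = 0 := List.count_eq_zero.mpr hxin
            have hxc : x = c := (List.mem_cons.mp hx).resolve_right hxin
            subst hxc
            rw [h0, if_pos rfl, if_pos hc]
            push_cast; omega
        · intro h x hx
          have h2 := h x (List.mem_cons_of_mem _ hx)
          rw [hcnt x] at h2
          rw [hg x]
          omega
    · have hcf : d.contains c = false := by simpa using hc
      have hfail : ¬ ∀ x ∈ c :: cs, (((c :: cs).count x : Int)) ≤ if d.contains x then d.getD x 0 else 0 := by
        intro h
        have hx := h c (by simp)
        rw [hcf] at hx
        simp only [Bool.false_eq_true, if_false] at hx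
        have hpos : 0 < (c :: cs).count c := List.count_pos_iff.mpr (by simp)
        omega
      have hstep : CompareStrLoop d (c :: cs) = false := by
        unfold CompareStrLoop
        rw [if_pos hcf]
      rw [hstep, decide_eq_false hfail]

-- A decides the multiset-inclusion predicate
lemma compare_str_eq (str_1 str_2 : String) :
    Compare_str str_1 str_2
      = decide (∀ c ∈ str_2.toList, (str_2.toList.count c : Int) ≤ (str_1.toList.count c : Int)) := by
  unfold Compare_str
  rw [show str_1.toList.foldl (fun d c => d.modify c 0 (· + 1)) PySem.Dict.empty
        = PySem.Dict.counter str_1.toList from (PySem.Dict.counter_eq_foldl _).symm]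
  rw [compareStrLoop_eq]
  congr 1
  apply propext
  constructor <;> intro h c hc <;> have hx := h c hc
  · by_cases hcont : (PySem.Dict.counter str_1.toList).contains c
    · rwa [if_pos hcont, PySem.Dict.getD_counter] at hx
    · rw [if_neg hcont] at hx
      have : str_1.toList.count c = 0 := by
        by_contra hne
        exact hcont (by
          rw [PySem.Dict.contains_iff_mem_keys, PySem.Dict.keys_counter, PySem.Set.mem_ofList]
          exact List.count_pos_iff.mp (Nat.pos_of_ne_zero hne))
      rw [this]; exact_mod_cast hx
  · rw [PySem.Dict.getD_counter]
    split_ifs with hcont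
    · exact hx
    · have hc0 : str_1.toList.count c = 0 := by
        rw [PySem.Dict.contains_iff_mem_keys, PySem.Dict.keys_counter, PySem.Set.mem_ofList] at hcont
        exact List.count_eq_zero.mpr hcont
      rw [hc0] at hx; exact_mod_cast hx

-- the merge scan over two weakly-increasing lists decides multiset inclusion
lemma compareMerge_eq (xs ys : List Char)
    (hx : xs.Pairwise (· ≤ ·)) (hy : ys.Pairwise (· ≤ ·)) :
    CompareMerge xs ys = decide (∀ c ∈ ys, ys.count c ≤ xs.count c) := by
  induction xs generalizing ys with
  | nil =>
    cases ys with
    | nil => simp [CompareMerge]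
    | cons y ys =>
      have hfail : ¬ ∀ c ∈ y :: ys, (y :: ys).count c ≤ ([] : List Char).count c := by
        intro h
        have := h y (by simp)
        have hpos : 0 < (y :: ys).count y := List.count_pos_iff.mpr (by simp)
        rw [List.count_nil] at this; omega
      simp only [CompareMerge, decide_eq_false hfail]
  | cons x xs ih =>
    cases ys with
    | nil => simp [CompareMerge]
    | cons y ys =>
      have hcc : ∀ (a : Char) (b : Char) (l : List Char),
          (b :: l).count a = l.count a + (if a = b then 1 else 0) := by
        intro a b l; rw [List.count_cons]; congr 1
        by_cases h : a = b
        · simp [h]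
        · have h2 : ¬b = a := fun he => h he.symm
          simp [h, h2]
      have hx' := (List.pairwise_cons.mp hx).2
      have hxall := (List.pairwise_cons.mp hx).1
      have hy' := (List.pairwise_cons.mp hy).2
      have hyall := (List.pairwise_cons.mp hy).1
      by_cases hlt : x < y
      · rw [show CompareMerge (x :: xs) (y :: ys) = CompareMerge xs (y :: ys) by
          simp only [CompareMerge]; rw [if_pos hlt]]
        rw [ih (y :: ys) hx' hy]
        congr 1; apply propext
        constructor
        · intro h c hc
          have := h c hc
          have : (y :: ys).count c ≤ xs.count c := this
          calc (y :: ys).count c ≤ xs.count c := this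
            _ ≤ (x :: xs).count c := by rw [hcc]; split <;> omega
        · intro h c hc
          have hge : y ≤ c := by
            rcases List.mem_cons.mp hc with h1 | h1
            · exact le_of_eq h1.symm
            · exact hyall c h1
          have hne : c ≠ x := by intro he; subst he; exact absurd hlt (not_lt.mpr hge)
          have := h c hc
          rw [hcc c x, if_neg hne] at this
          omega
      · by_cases heq : x = y
        · rw [show CompareMerge (x :: xs) (y :: ys) = CompareMerge xs ys by
            simp only [CompareMerge]; rw [if_neg hlt, if_pos heq]]
          rw [ih ys hx' hy']
          subst heq
          congr 1; apply propext
          constructor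
          · intro h c hc
            rcases List.mem_cons.mp hc with h1 | h1
            · subst h1
              rw [hcc, hcc, if_pos rfl]
              by_cases hin : c ∈ ys
              · have := h c hin; omega
              · have : ys.count c = 0 := List.count_eq_zero.mpr hin
                omega
            · have := h c h1
              rw [hcc, hcc]
              split_ifs <;> omega
          · intro h c hc
            have := h c (List.mem_cons_of_mem _ hc)
            rw [hcc, hcc] at this
            split_ifs at this with h1 <;> omega
        · rw [show CompareMerge (x :: xs) (y :: ys) = false by
            simp only [CompareMerge]; rw [if_neg hlt, if_neg heq]]
          have hylt : y < x := lt_of_le_of_ne (not_lt.mp hlt) (fun he => heq he.symm)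
          have hfail : ¬ ∀ c ∈ y :: ys, (y :: ys).count c ≤ (x :: xs).count c := by
            intro h
            have hxy := h y (by simp)
            have h0 : (x :: xs).count y = 0 := by
              apply List.count_eq_zero.mpr
              intro hm
              rcases List.mem_cons.mp hm with h1 | h1
              · exact absurd h1.symm (ne_of_gt hylt)
              · exact absurd hylt (not_lt.mpr (hxall y h1))
            have hpos : 0 < (y :: ys).count y := List.count_pos_iff.mpr (by simp)
            omega
          rw [decide_eq_false hfail]

-- B decides the same multiset-inclusion predicate
lemma compare_str_alt_eq (str_1 str_2 : String) :
    Compare_str_alt str_1 str_2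
      = decide (∀ c ∈ str_2.toList, (str_2.toList.count c : Int) ≤ (str_1.toList.count c : Int)) := by
  unfold Compare_str_alt
  rw [compareMerge_eq _ _ (PySem.List.sorted_pairwise _ _) (PySem.List.sorted_pairwise _ _)]
  have hp1 := PySem.List.sorted_perm str_1.toList (fun c : Char => c) false
  have hp2 := PySem.List.sorted_perm str_2.toList (fun c : Char => c) false
  congr 1; apply propext
  constructor
  · intro h c hc
    have := h c (hp2.mem_iff.mpr hc)
    rw [hp1.count_eq, hp2.count_eq] at this
    exact_mod_cast this
  · intro h c hc
    rw [hp1.count_eq, hp2.count_eq]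
    have := h c (hp2.mem_iff.mp hc)
    exact_mod_cast this

-- ===== VERDICT (by name: the statement is the Claim_ definition above) =====
theorem Compare_str_spec : Claim_equal_Compare_str := by
  intro s1 s2 _
  unfold Spec_Compare_str
  rw [compare_str_eq, compare_str_alt_eq]
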